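-- pv_equiv track=rewrite | github.com/Sciotaku/COSC1 | PracticeProblems/Practice Problems/nestedloops/1.py | one_inc_one_dec
-- ===== SOURCE A (Python) =====
-- def is_increasing(glist):
--     for i in range(0, len(glist)-1):
--         if glist[i] > glist[i+1]:
--             return False
--     return True
--
-- def is_decreasing(glist):
--     for i in range(0, len(glist)-1):
--         if glist[i] < glist[i+1]:
--             return False
--     return True
--
-- def one_inc_one_dec(glol):
--     inc = False
--     dec = False
--
--     for l in glol:
--         if is_increasing(l):
--             inc = True #set to True if there is a list sorted in increasing order
--         if is_decreasing(l):
--             dec = True #set to True if there is a list sorted in decreasing orderd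
--
--     return (inc and dec)
-- ===== SOURCE B (Python) =====
-- def one_inc_one_dec(glol):
--     inc = any(l == sorted(l) for l in glol)
--     dec = any(l == sorted(l, reverse=True) for l in glol)
--     return inc and dec
-- ===== Notes on version B (the rewrite author's own statement) =====
-- stated objective: idiomatic
-- what changed: Replaces the index-based adjacent-pair scans and the flag-carrying loop with any() over sort-and-compare tests (l == sorted(l) / l == sorted(l, reverse=True)).
import Mathlib
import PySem

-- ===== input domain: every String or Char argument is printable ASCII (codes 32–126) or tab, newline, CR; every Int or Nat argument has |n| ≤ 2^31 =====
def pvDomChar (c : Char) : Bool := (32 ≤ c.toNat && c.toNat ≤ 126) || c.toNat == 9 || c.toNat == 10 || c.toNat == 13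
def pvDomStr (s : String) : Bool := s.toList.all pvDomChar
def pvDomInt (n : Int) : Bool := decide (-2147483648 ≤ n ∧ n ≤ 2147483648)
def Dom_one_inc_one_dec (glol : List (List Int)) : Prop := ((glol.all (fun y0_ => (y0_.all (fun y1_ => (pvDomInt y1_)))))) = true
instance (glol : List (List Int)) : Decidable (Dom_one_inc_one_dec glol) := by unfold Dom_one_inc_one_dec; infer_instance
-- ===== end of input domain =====

-- ===== PORT A =====
-- B changes: tests each sublist by comparing with a sorted copy (any()/sorted) instead of
-- index-based adjacent-pair scans with flag-setting loops; idiomatic, not claimed faster.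

-- helper of A: is_increasing — for i in range(0, len(glist)-1): if glist[i] > glist[i+1]: return False
def isIncGo (l : List Int) : List Int → Bool
  | [] => true
  | i :: rest =>
      if PySem.List.pyGetD l i 0 > PySem.List.pyGetD l (i + 1) 0 then false
      else isIncGo l rest

def is_increasing (glist : List Int) : Bool :=
  isIncGo glist (PySem.List.pyRange 0 ((glist.length : Int) - 1) 1)

-- helper of A: is_decreasing
def isDecGo (l : List Int) : List Int → Bool
  | [] => true
  | i :: rest =>
      if PySem.List.pyGetD l i 0 < PySem.List.pyGetD l (i + 1) 0 then false
      else isDecGo l rest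

def is_decreasing (glist : List Int) : Bool :=
  isDecGo glist (PySem.List.pyRange 0 ((glist.length : Int) - 1) 1)

-- A's main loop over glol carrying the two flags
def oidGo : List (List Int) → Bool → Bool → Bool
  | [], inc, dec => inc && dec
  | l :: rest, inc, dec =>
      oidGo rest (if is_increasing l then true else inc)
            (if is_decreasing l then true else dec)

def one_inc_one_dec (glol : List (List Int)) : Bool :=
  oidGo glol false false

-- ===== PORT B =====
def one_inc_one_dec_alt (glol : List (List Int)) : Bool :=
  let inc := glol.any (fun l => l == PySem.List.sorted l (fun x => x) false)
  let dec := glol.any (fun l => l == PySem.List.sorted l (fun x => x) true)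
  inc && dec

-- ===== PRECONDITION & SPEC =====
def Spec_one_inc_one_dec (glol : List (List Int)) (out : Bool) : Prop := out = one_inc_one_dec_alt glol
instance (glol : List (List Int)) (out : Bool) : Decidable (Spec_one_inc_one_dec glol out) := by unfold Spec_one_inc_one_dec; infer_instance

-- ===== CLAIM (what is proved, stated in full; the proofs are below) =====
def Claim_equal_one_inc_one_dec : Prop := ∀ (glol : List (List Int)), Dom_one_inc_one_dec glol → Spec_one_inc_one_dec glol (one_inc_one_dec glol)

-- ===== LEMMAS AND PROOFS =====

theorem isIncGo_eq_all (l : List Int) (idxs : List Int) :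
    isIncGo l idxs = idxs.all (fun i => !decide (PySem.List.pyGetD l i 0 > PySem.List.pyGetD l (i + 1) 0)) := by
  induction idxs with
  | nil => rfl
  | cons i rest ih => simp only [isIncGo, List.all_cons, ih]; split_ifs with h <;> simp [h]

theorem isDecGo_eq_all (l : List Int) (idxs : List Int) :
    isDecGo l idxs = idxs.all (fun i => !decide (PySem.List.pyGetD l i 0 < PySem.List.pyGetD l (i + 1) 0)) := by
  induction idxs with
  | nil => rfl
  | cons i rest ih => simp only [isDecGo, List.all_cons, ih]; split_ifs with h <;> simp [h]

theorem adjacent_iff_pairwise (l : List Int) (R : Int → Int → Prop) [DecidableRel R]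
    [IsTrans Int R] :
    ((PySem.List.pyRange 0 ((l.length : Int) - 1) 1).all
      (fun i => decide (R (PySem.List.pyGetD l i 0) (PySem.List.pyGetD l (i + 1) 0)))) = true
    ↔ l.Pairwise R := by
  rw [← List.isChain_iff_pairwise, List.isChain_iff_getElem, List.all_eq_true]
  constructor
  · intro h k hk
    have hmem : (k : Int) ∈ PySem.List.pyRange 0 ((l.length : Int) - 1) 1 := by
      rw [PySem.List.mem_pyRange_one]; omega
    have := h _ hmem
    have h1 : PySem.List.pyGetD l (k : Int) 0 = l[k] :=
      PySem.List.pyGetD_ofNat l k 0 (by omega)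
    have h2 : PySem.List.pyGetD l ((k : Int) + 1) 0 = l[k + 1] := by
      have : ((k : Int) + 1) = ((k + 1 : Nat) : Int) := by push_cast; ring
      rw [this]; exact PySem.List.pyGetD_ofNat l (k + 1) 0 (by omega)
    rw [h1, h2] at this; exact of_decide_eq_true this
  · intro h i hi
    rw [PySem.List.mem_pyRange_one] at hi
    obtain ⟨k, rfl⟩ : ∃ k : Nat, (k : Int) = i := ⟨i.toNat, by omega⟩
    have hk : k + 1 < l.length := by omega
    have h1 : PySem.List.pyGetD l (k : Int) 0 = l[k] :=
      PySem.List.pyGetD_ofNat l k 0 (by omega)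
    have h2 : PySem.List.pyGetD l ((k : Int) + 1) 0 = l[k + 1] := by
      have : ((k : Int) + 1) = ((k + 1 : Nat) : Int) := by push_cast; ring
      rw [this]; exact PySem.List.pyGetD_ofNat l (k + 1) 0 (by omega)
    rw [h1, h2]; exact decide_eq_true (h k hk)

theorem is_increasing_eq (l : List Int) :
    is_increasing l = (l == PySem.List.sorted l (fun x => x) false) := by
  apply Bool.coe_iff_coe.mp
  rw [is_increasing, isIncGo_eq_all]
  have hA : ∀ a b : Int, (!decide (a > b)) = decide (a ≤ b) := by
    intro a b; by_cases h : a ≤ b <;> simp [h] <;> omega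
  simp only [hA]
  rw [adjacent_iff_pairwise l (· ≤ ·)]
  constructor
  · intro h
    simp only [beq_iff_eq]
    exact (PySem.List.sorted_eq_self_of_pairwise l (fun x => x) h).symm
  · intro h
    have h' : l = PySem.List.sorted l (fun x => x) false := by simpa using h
    rw [h']; exact PySem.List.sorted_pairwise l (fun x => x)

theorem is_decreasing_eq (l : List Int) :
    is_decreasing l = (l == PySem.List.sorted l (fun x => x) true) := by
  apply Bool.coe_iff_coe.mp
  rw [is_decreasing, isDecGo_eq_all]
  have hA : ∀ a b : Int, (!decide (a < b)) = decide (b ≤ a) := by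
    intro a b; by_cases h : b ≤ a <;> simp [h] <;> omega
  simp only [hA]
  rw [adjacent_iff_pairwise l (fun a b => b ≤ a)]
  constructor
  · intro h
    simp only [beq_iff_eq]
    exact (PySem.List.sorted_rev_eq_self_of_pairwise l (fun x => x) h).symm
  · intro h
    have h' : l = PySem.List.sorted l (fun x => x) true := by simpa using h
    rw [h']; exact PySem.List.sorted_pairwise_rev l (fun x => x)

theorem oidGo_eq (glol : List (List Int)) (inc dec : Bool) :
    oidGo glol inc dec =
      ((inc || glol.any (fun l => l == PySem.List.sorted l (fun x => x) false)) &&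
       (dec || glol.any (fun l => l == PySem.List.sorted l (fun x => x) true))) := by
  induction glol generalizing inc dec with
  | nil => simp [oidGo]
  | cons l rest ih =>
    rw [oidGo, ih, is_increasing_eq, is_decreasing_eq]
    cases h1 : (l == PySem.List.sorted l (fun x => x) false) <;>
      cases h2 : (l == PySem.List.sorted l (fun x => x) true) <;>
        simp [h1, h2]

-- ===== VERDICT (by name: the statement is the Claim_ definition above) =====
theorem one_inc_one_dec_spec : Claim_equal_one_inc_one_dec := by
  intro glol _
  unfold Spec_one_inc_one_dec one_inc_one_dec one_inc_one_dec_alt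
  rw [oidGo_eq]
  simp
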